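-- pv_equiv track=rewrite | github.com/ItayTurniansky/Python-Projects | Image Editor/image_editor.py | create_relative_matrix_top_left
-- ===== SOURCE A (Python) =====
-- def create_relative_matrix_top_left(cell_loc: list[int], patch, image):
--     """a help function that creates a relative matrix starting from top left"""
--     relative_kernel = []
--     tmp_row = []
--     for row in range(len(patch)):
--         for column in range(len(patch[0])):
--             tmp_row.append(image[cell_loc[0]+row][cell_loc[1]+column])
--         relative_kernel.append(tmp_row)
--         tmp_row = []
--     return relative_kernel
-- ===== SOURCE B (Python) =====
-- def create_relative_matrix_top_left(cell_loc: list[int], patch, image):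
--     """a help function that creates a relative matrix starting from top left"""
--     relative_kernel = [[] for _ in range(len(patch))]
--     if patch:
--         width = len(patch[0])
--         for k in range(len(patch) * width):
--             relative_kernel[k // width].append(
--                 image[cell_loc[0] + k // width][cell_loc[1] + k % width])
--     return relative_kernel
-- ===== Notes on version B (the rewrite author's own statement) =====
-- stated objective: alternative
-- what changed: The two nested loops and the tmp_row accumulator are replaced by one flat loop over all h*w cell positions, recovering the row and column of each position by divmod and appending directly into a pre-allocated list of output rows.
import Mathlib
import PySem

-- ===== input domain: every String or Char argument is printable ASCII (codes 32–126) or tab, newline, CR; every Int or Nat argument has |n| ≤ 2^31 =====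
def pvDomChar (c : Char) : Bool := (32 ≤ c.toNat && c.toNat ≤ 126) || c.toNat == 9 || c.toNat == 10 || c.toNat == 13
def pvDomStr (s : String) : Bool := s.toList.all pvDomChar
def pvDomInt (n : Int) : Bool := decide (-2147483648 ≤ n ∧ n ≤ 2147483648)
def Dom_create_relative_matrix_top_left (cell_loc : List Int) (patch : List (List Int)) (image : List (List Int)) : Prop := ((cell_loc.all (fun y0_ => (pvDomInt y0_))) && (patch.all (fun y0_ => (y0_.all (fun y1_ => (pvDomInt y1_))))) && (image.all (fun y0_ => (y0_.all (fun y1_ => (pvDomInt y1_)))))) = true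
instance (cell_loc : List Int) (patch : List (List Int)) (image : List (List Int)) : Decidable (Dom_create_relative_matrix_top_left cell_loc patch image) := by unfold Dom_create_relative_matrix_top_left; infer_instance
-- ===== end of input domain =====

-- B replaces A's two nested loops and tmp_row accumulator by one flat loop over all h*w cell
-- positions, recovering row/column by divmod and appending into a pre-allocated list of rows.

-- ===== PORT A =====
def create_relative_matrix_top_left (cell_loc : List Int) (patch : List (List Int)) (image : List (List Int)) : List (List Int) :=
  -- state: (relative_kernel, tmp_row)
  (((PySem.List.pyRange 0 patch.length 1).foldl
      (fun (st : List (List Int) × List Int) row =>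
        (st.1 ++ [(PySem.List.pyRange 0 (PySem.List.pyGetD patch 0 []).length 1).foldl
          (fun tmp_row column =>
            tmp_row ++ [PySem.List.pyGetD
              (PySem.List.pyGetD image (PySem.List.pyGetD cell_loc 0 0 + row) [])
              (PySem.List.pyGetD cell_loc 1 0 + column) 0]) st.2], []))
      ([], [])).1)

-- ===== PORT B =====
def create_relative_matrix_top_left_alt (cell_loc : List Int) (patch : List (List Int)) (image : List (List Int)) : List (List Int) :=
  -- relative_kernel = [[] for _ in range(len(patch))]; if patch: one flat loop over range(h*width),
  -- relative_kernel[k // width].append(image[cell_loc[0] + k // width][cell_loc[1] + k % width])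
  if patch = [] then (List.range patch.length).map (fun _ => ([] : List Int))
  else
    (PySem.List.pyRange 0 ((patch.length * (PySem.List.pyGetD patch 0 []).length : Nat) : Int) 1).foldl
      (fun rk k =>
        PySem.List.pySetD rk (PySem.Int.floordiv k ((PySem.List.pyGetD patch 0 []).length : Int))
          (PySem.List.pyGetD rk (PySem.Int.floordiv k ((PySem.List.pyGetD patch 0 []).length : Int)) [] ++
            [PySem.List.pyGetD
              (PySem.List.pyGetD image (PySem.List.pyGetD cell_loc 0 0 + PySem.Int.floordiv k ((PySem.List.pyGetD patch 0 []).length : Int)) [])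
              (PySem.List.pyGetD cell_loc 1 0 + PySem.Int.mod k ((PySem.List.pyGetD patch 0 []).length : Int)) 0]))
      ((List.range patch.length).map (fun _ => ([] : List Int)))

-- ===== PRECONDITION & SPEC =====
-- Pre_ is exactly the inputs on which the Python A returns normally: either no cell is read
-- (empty patch or empty first patch row), or cell_loc has the two coordinates and every read
-- row/column index is in Python's index range (negative wraparound included); outside Pre_
-- A raises IndexError.
def Pre_create_relative_matrix_top_left (cell_loc : List Int) (patch : List (List Int)) (image : List (List Int)) : Prop :=
  patch = [] ∨ (PySem.List.pyGetD patch 0 []).length = 0 ∨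
    (2 ≤ cell_loc.length ∧
     ∀ r ∈ PySem.List.pyRange 0 patch.length 1,
       PySem.Raise.InRange image.length (PySem.List.pyGetD cell_loc 0 0 + r) ∧
       ∀ c ∈ PySem.List.pyRange 0 (PySem.List.pyGetD patch 0 []).length 1,
         PySem.Raise.InRange
           (PySem.List.pyGetD image (PySem.List.pyGetD cell_loc 0 0 + r) []).length
           (PySem.List.pyGetD cell_loc 1 0 + c))
instance (cell_loc : List Int) (patch : List (List Int)) (image : List (List Int)) : Decidable (Pre_create_relative_matrix_top_left cell_loc patch image) := by unfold Pre_create_relative_matrix_top_left; infer_instance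

def pvWitness_create_relative_matrix_top_left : List Int × List (List Int) × List (List Int) :=
  ([0, 0], [[1]], [[5]])

def Spec_create_relative_matrix_top_left (cell_loc : List Int) (patch : List (List Int)) (image : List (List Int)) (out : List (List Int)) : Prop := out = create_relative_matrix_top_left_alt cell_loc patch image
instance (cell_loc : List Int) (patch : List (List Int)) (image : List (List Int)) (out : List (List Int)) : Decidable (Spec_create_relative_matrix_top_left cell_loc patch image out) := by unfold Spec_create_relative_matrix_top_left; infer_instance

-- ===== CLAIM (what is proved, stated in full; the proofs are below) =====
def Claim_equal_create_relative_matrix_top_left : Prop := ∀ (cell_loc : List Int) (patch : List (List Int)) (image : List (List Int)), Dom_create_relative_matrix_top_left cell_loc patch image → Pre_create_relative_matrix_top_left cell_loc patch image → Spec_create_relative_matrix_top_left cell_loc patch image (create_relative_matrix_top_left cell_loc patch image)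

-- ===== LEMMAS AND PROOFS =====

-- A's outer fold over the pair state (relative_kernel, tmp_row), with tmp_row reset to []
-- after every row, computes acc ++ map of the per-row function applied to an empty tmp_row.
lemma foldA_eq_map (g : List Int → Int → List Int) :
    ∀ (lst : List Int) (acc : List (List Int)),
      (lst.foldl (fun (st : List (List Int) × List Int) row => (st.1 ++ [g st.2 row], ([] : List Int)))
        (acc, [])).1 = acc ++ lst.map (fun row => g [] row) := by
  intro lst
  induction lst with
  | nil => intro acc; simp
  | cons x xs ih => intro acc; simp [List.foldl_cons, ih]

-- the flat-loop step (all indices already in Nat form)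
def pvFlatStep (v : Nat → Nat → Int) (w : Nat) (rk : List (List Int)) (kn : Nat) : List (List Int) :=
  rk.set (kn / w) (rk.getD (kn / w) [] ++ [v (kn / w) (kn % w)])

-- a trailing row that no processed index reaches is carried through the fold unchanged
lemma pvFlat_untouched (v : Nat → Nat → Int) (w : Nat) :
    ∀ (ks : List Nat) (xs : List (List Int)) (y : List Int),
      (∀ kn ∈ ks, kn / w < xs.length) →
      (ks.foldl (pvFlatStep v w) (xs ++ [y])) = ks.foldl (pvFlatStep v w) xs ++ [y] := by
  intro ks
  induction ks with
  | nil => intro xs y _; rfl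
  | cons k ks ih =>
    intro xs y hb
    have hk : k / w < xs.length := hb k (List.mem_cons_self ..)
    have hset : pvFlatStep v w (xs ++ [y]) k = pvFlatStep v w xs k ++ [y] := by
      unfold pvFlatStep
      rw [List.getD_append _ _ _ _ hk, List.set_append_left _ _ hk]
    rw [List.foldl_cons, List.foldl_cons, hset, ih]
    intro kn hkn
    have := hb kn (List.mem_cons_of_mem _ hkn)
    simpa [pvFlatStep] using this
-- the block of indices h*w+j .. h*w+w-1 appends exactly the missing tail of row h
lemma pvFlat_lastRow (v : Nat → Nat → Int) (w : Nat) (M : List (List Int)) :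
    ∀ (n j : Nat) (acc : List Int), j + n = w →
      ((List.range' (j + M.length * w) n).foldl (pvFlatStep v w) (M ++ [acc]))
        = M ++ [acc ++ (List.range' j n).map (fun c => v M.length c)] := by
  intro n
  induction n with
  | zero => intro j acc _; simp
  | succ m ih =>
    intro j acc hjw
    have hw : 0 < w := by omega
    have hdiv : (j + M.length * w) / w = M.length := by
      rw [Nat.add_mul_div_right _ _ hw, Nat.div_eq_of_lt (by omega)]
      omega
    have hmod : (j + M.length * w) % w = j := by
      rw [Nat.add_mul_mod_self_right, Nat.mod_eq_of_lt (by omega)]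
    have hstep : pvFlatStep v w (M ++ [acc]) (j + M.length * w)
        = M ++ [acc ++ [v M.length j]] := by
      unfold pvFlatStep
      rw [hdiv, hmod, List.getD_append_right _ _ _ _ (le_refl _),
          List.set_append_right _ _ (le_refl _)]
      simp
    rw [List.range'_succ, List.foldl_cons, hstep]
    have harg : j + 1 + M.length * w = (j + M.length * w) + 1 := by omega
    rw [← harg, ih (j + 1) (acc ++ [v M.length j]) (by omega)]
    simp [List.range'_succ]

-- the whole flat loop over range (h*w) fills the h pre-allocated rows row by row
lemma pvFlat_fold (v : Nat → Nat → Int) (w : Nat) :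
    ∀ (h : Nat),
      (List.range (h * w)).foldl (pvFlatStep v w) (List.replicate h [])
        = (List.range h).map (fun r => (List.range w).map (fun c => v r c)) := by
  intro h
  induction h with
  | zero => simp
  | succ h ih =>
    rcases Nat.eq_zero_or_pos w with hw0 | hw
    · subst hw0
      simp [List.map_const']
    · have hsplit : List.range ((h + 1) * w) = List.range (h * w) ++ List.range' (h * w) w := by
        rw [Nat.succ_mul, List.range_add, List.range'_eq_map_range]
      have hbound : ∀ kn ∈ List.range (h * w), kn / w < (List.replicate h ([] : List Int)).length := by
        intro kn hkn
        have hlt : kn < h * w := by simpa using hkn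
        simpa [List.length_replicate] using (Nat.div_lt_iff_lt_mul hw).2 hlt
      rw [hsplit, List.foldl_append, List.replicate_succ', pvFlat_untouched v w _ _ _ hbound, ih]
      have hM : ((List.range h).map (fun r => (List.range w).map (fun c => v r c))).length = h := by simp
      have hlast := pvFlat_lastRow v w ((List.range h).map (fun r => (List.range w).map (fun c => v r c))) w 0 [] (by omega)
      rw [hM, Nat.zero_add] at hlast
      rw [hlast]
      simp [List.range_succ, ← List.range_eq_range']

-- ===== VERDICT (by name: the statement is the Claim_ definition above) =====
theorem create_relative_matrix_top_left_spec : Claim_equal_create_relative_matrix_top_left := by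
  intro cell_loc patch image _ _
  unfold Spec_create_relative_matrix_top_left
  unfold create_relative_matrix_top_left create_relative_matrix_top_left_alt
  by_cases hp : patch = []
  · subst hp; simp [PySem.List.pyRange_one_eq_nil]
  · rw [if_neg hp,
        foldA_eq_map (fun tmp_row row =>
          (PySem.List.pyRange 0 ((PySem.List.pyGetD patch 0 []).length : Int) 1).foldl
            (fun tmp_row column =>
              tmp_row ++ [PySem.List.pyGetD
                (PySem.List.pyGetD image (PySem.List.pyGetD cell_loc 0 0 + row) [])
                (PySem.List.pyGetD cell_loc 1 0 + column) 0]) tmp_row)]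
    simp only [List.nil_append, PySem.List.pyRange_zero_nat, List.foldl_map, List.map_map,
      PySem.Int.floordiv_natCast, PySem.Int.mod_natCast, PySem.List.pySetD_natCast,
      PySem.List.pyGetD_natCast, PySem.List.foldl_append_singleton_eq_map, Function.comp_def]
    have hrepl : (List.range patch.length).map (fun _ => ([] : List Int))
        = List.replicate patch.length [] := by
      simp [List.map_const']
    rw [hrepl]
    exact (pvFlat_fold
      (fun r c => PySem.List.pyGetD
        (PySem.List.pyGetD image (PySem.List.pyGetD cell_loc 0 0 + (r : Int)) [])
        (PySem.List.pyGetD cell_loc 1 0 + (c : Int)) 0)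
      (PySem.List.pyGetD patch 0 []).length patch.length).symm
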